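-- pv_equiv track=rewrite | github.com/cybershiptrooper/user_modelling | utils/substrings.py | has_gendered_substr
-- ===== SOURCE A (Python) =====
-- def has_gendered_substr(text) -> bool:
--     male_substr = ["man", "guy", "men", "boys", "my wife"]
--     female_substr = ["woman", "girl", "women", "girls", "my husband", "feminine", "female"]
--     for substr in male_substr:
--         for word in text.lower().split(' '):
--             if substr == word.strip(".,!?"):
--                 return True
--     for substr in female_substr:
--         for word in text.lower().split(' '):
--             if substr == word.strip(".,!?"):
--                 return True
--     return False
-- ===== SOURCE B (Python) =====
-- def has_gendered_substr(text) -> bool: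
--     # single left-to-right character scan: build each space-delimited token on the fly
--     # (lowercasing char by char), trim '.,!?' from its ends when a space/end flushes it,
--     # and test it against the merged target tuple
--     targets = ("man", "guy", "men", "boys", "my wife",
--                "woman", "girl", "women", "girls", "my husband", "feminine", "female")
--     token = []
--     for ch in text + ' ':          # trailing sentinel space flushes the last token
--         if ch == ' ':
--             while token and token[0] in '.,!?':
--                 token.pop(0)
--             while token and token[-1] in '.,!?':
--                 token.pop()
--             if ''.join(token) in targets:
--                 return True
--             token = []
--         else:
--             token.append(ch.lower())
--     return False
-- ===== Notes on version B (the rewrite author's own statement) =====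
-- stated objective: alternative
-- what changed: A lowercases and re-splits the whole text and rescans the token list once per each of twelve target words; B is a single character-level scanner that builds each space-delimited token on the fly (lowercasing per character), trims punctuation at token boundaries with explicit pops, and tests each finished token once against the merged target tuple.
import Mathlib
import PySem

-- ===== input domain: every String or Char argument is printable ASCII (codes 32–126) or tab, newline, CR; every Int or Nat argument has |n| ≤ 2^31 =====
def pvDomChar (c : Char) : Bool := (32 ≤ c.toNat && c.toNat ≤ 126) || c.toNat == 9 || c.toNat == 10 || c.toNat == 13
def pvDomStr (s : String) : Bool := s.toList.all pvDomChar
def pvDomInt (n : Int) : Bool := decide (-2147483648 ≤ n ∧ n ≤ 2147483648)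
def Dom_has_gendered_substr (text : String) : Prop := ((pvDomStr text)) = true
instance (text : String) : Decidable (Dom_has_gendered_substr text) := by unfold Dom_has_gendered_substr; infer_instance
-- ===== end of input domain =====

-- B replaces A's twelve lower/split/rescan passes by one character-level scanner that
-- builds each space-delimited token on the fly and tests it once (objective: alternative).

-- ===== PORT A =====
-- text.lower().split(' '): sep is the nonempty literal " ", so split? is always `some`
-- and the `.getD []` default is never used.
def pvWords (text : String) : List String :=
  (PySem.Str.split? (PySem.Str.lower text) " ").getD []

def has_gendered_substr (text : String) : Bool :=
  (["man", "guy", "men", "boys", "my wife"].any (fun substr =>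
      (pvWords text).any (fun word => substr == PySem.Str.stripChars word ".,!?"))) ||
  (["woman", "girl", "women", "girls", "my husband", "feminine", "female"].any (fun substr =>
      (pvWords text).any (fun word => substr == PySem.Str.stripChars word ".,!?")))

-- ===== PORT B =====
def pvTargets : List String :=
  ["man", "guy", "men", "boys", "my wife",
   "woman", "girl", "women", "girls", "my husband", "feminine", "female"]

-- `while token and token[0] in '.,!?': token.pop(0)`
def pvTrimFront : List Char → List Char
  | [] => []
  | c :: cs => if (".,!?".toList).contains c then pvTrimFront cs else c :: cs

-- `while token and token[-1] in '.,!?': token.pop()`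
def pvTrimBack (t : List Char) : List Char :=
  if h : t = [] then t
  else if (".,!?".toList).contains (t.getLast h) then pvTrimBack t.dropLast else t
termination_by t.length
decreasing_by
  have hl : t.length ≠ 0 := by simpa [List.length_eq_zero_iff] using h
  simp [List.length_dropLast]; omega

-- the `for ch in text + ' '` loop with the running token as accumulator
def pvScan : List Char → List Char → Bool
  | [], _token => false
  | c :: rest, token =>
    if c = ' ' then
      if pvTargets.contains (String.ofList (pvTrimBack (pvTrimFront token))) then true
      else pvScan rest []
    else pvScan rest (token ++ [PySem.Chars.lowerChar c])

def has_gendered_substr_alt (text : String) : Bool :=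
  pvScan (text.toList ++ [' ']) []

-- ===== PRECONDITION & SPEC =====
def Spec_has_gendered_substr (text : String) (out : Bool) : Prop := out = has_gendered_substr_alt text
instance (text : String) (out : Bool) : Decidable (Spec_has_gendered_substr text out) := by unfold Spec_has_gendered_substr; infer_instance

-- ===== CLAIM (what is proved, stated in full; the proofs are below) =====
def Claim_equal_has_gendered_substr : Prop := ∀ (text : String), Dom_has_gendered_substr text → Spec_has_gendered_substr text (has_gendered_substr text)

-- ===== LEMMAS AND PROOFS =====

-- the per-token test both programs perform, phrased on char lists
def pvChk (tok : List Char) : Bool :=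
  pvTargets.contains (String.ofList (PySem.Chars.stripChars tok ".,!?".toList))

-- B's two trim loops compute exactly Python's str.strip(".,!?")
theorem pv_trimFront_eq (t : List Char) :
    pvTrimFront t = t.dropWhile (fun c => (".,!?".toList).contains c) := by
  induction t with
  | nil => rfl
  | cons c cs ih =>
    rw [List.dropWhile_cons]
    simp only [pvTrimFront, ih]

theorem pv_trimBack_eq (t : List Char) :
    pvTrimBack t = (t.reverse.dropWhile (fun c => (".,!?".toList).contains c)).reverse := by
  induction t using List.reverseRecOn with
  | nil => rw [pvTrimBack.eq_def]; simp
  | append_singleton ts c ih =>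
    have hne : ts ++ [c] ≠ [] := by simp
    rw [pvTrimBack.eq_def, dif_neg hne]
    have hlast : (ts ++ [c]).getLast hne = c := by simp
    have hrev : (ts ++ [c]).reverse = c :: ts.reverse := by simp
    rw [hlast, hrev, List.dropWhile_cons]
    cases h : (".,!?".toList).contains c
    · rw [if_neg (fun hx => Bool.false_ne_true hx), if_neg (fun hx => Bool.false_ne_true hx)]
      simp
    · rw [if_pos rfl, if_pos rfl]
      simpa using ih

theorem pv_trim_eq_strip (t : List Char) :
    pvTrimBack (pvTrimFront t) = PySem.Chars.stripChars t ".,!?".toList := by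
  rw [pv_trimFront_eq, pv_trimBack_eq]
  simp [PySem.Chars.stripChars]

theorem pv_modifyHead_id {α : Type} (l : List α) : List.modifyHead (fun x => x) l = l := by
  cases l <;> rfl

-- PySem's splitter with the one-char separator ' ' is Mathlib's List.splitOn ' '
theorem pv_go_eq (fuel : Nat) (l cur : List Char) (acc : List (List Char))
    (hf : l.length < fuel) :
    PySem.Chars.splitOn.go [' '] fuel l cur acc
      = acc.reverse ++ (List.splitOn ' ' l).modifyHead (cur.reverse ++ ·) := by
  induction fuel generalizing l cur acc with
  | zero => omega
  | succ f ih =>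
    cases l with
    | nil => simp [PySem.Chars.splitOn.go, List.splitOn, List.splitOnP_nil]
    | cons c rest =>
      by_cases hc : c = ' '
      · subst hc
        have hpre : [' '].isPrefixOf (' ' :: rest) = true := by simp [List.isPrefixOf]
        rw [PySem.Chars.splitOn.go, if_pos hpre]
        simp only [List.length_cons, List.length_nil, Nat.zero_add, List.drop_succ_cons,
          List.drop_zero]
        rw [ih rest [] ((cur.reverse) :: acc) (by simpa using Nat.lt_of_succ_lt_succ hf)]
        simp [List.splitOn, List.splitOnP_cons, pv_modifyHead_id]
      · have hpre : [' '].isPrefixOf (c :: rest) = false := by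
          simp [List.isPrefixOf, Ne.symm hc]
        rw [PySem.Chars.splitOn.go, if_neg (by simp [hpre])]
        rw [ih rest (c :: cur) acc (by simpa using Nat.lt_of_succ_lt_succ hf)]
        have hcb : (c == ' ') = false := by simp [hc]
        simp only [List.splitOn, List.splitOnP_cons, hcb, Bool.false_eq_true, if_false,
          List.modifyHead_modifyHead]
        congr 2
        funext x
        simp

theorem pv_splitOn_eq (s : List Char) :
    PySem.Chars.splitOn s [' '] = List.splitOn ' ' s := by
  rw [PySem.Chars.splitOn, pv_go_eq _ _ _ _ (by omega)]
  simp [pv_modifyHead_id]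

-- List.splitOn ' ' unfolded one character at a time
theorem pv_splitOn_cons (a : Char) (l : List Char) :
    List.splitOn ' ' (a :: l) = if a = ' ' then [] :: List.splitOn ' ' l
      else (List.splitOn ' ' l).modifyHead (a :: ·) := by
  by_cases h : a = ' ' <;>
    simp [List.splitOn, List.splitOnP_cons, h]

-- a space-free prefix just extends the first token of the split of the rest
theorem pv_splitOn_prefix (acc rest : List Char) (h : ' ' ∉ acc) :
    List.splitOn ' ' (acc ++ rest) = (List.splitOn ' ' rest).modifyHead (acc ++ ·) := by
  induction acc with
  | nil => simp [pv_modifyHead_id]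
  | cons a as ih =>
    have h1 : a ≠ ' ' := fun e => h (by simp [e])
    rw [List.cons_append, pv_splitOn_cons, if_neg h1,
      ih (fun hm => h (List.mem_cons_of_mem _ hm)), List.modifyHead_modifyHead]
    rfl

theorem pv_splitOn_spacefree (acc : List Char) (h : ' ' ∉ acc) :
    List.splitOn ' ' acc = [acc] := by
  have := pv_splitOn_prefix acc [] h
  simpa [List.splitOn, List.splitOnP_nil] using this

theorem pv_splitOn_mid (acc rest : List Char) (h : ' ' ∉ acc) :
    List.splitOn ' ' (acc ++ ' ' :: rest) = acc :: List.splitOn ' ' rest := by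
  rw [pv_splitOn_prefix acc _ h, pv_splitOn_cons, if_pos rfl]
  simp

-- lowercasing never creates a space
set_option maxHeartbeats 1000000 in
theorem pv_lowerChar_space (c : Char) : PySem.Chars.lowerChar c = ' ' ↔ c = ' ' := by
  unfold PySem.Chars.lowerChar PySem.Chars.isupper
  split_ifs with h
  · simp only [Bool.and_eq_true, decide_eq_true_eq] at h
    obtain ⟨h1, h2⟩ := h
    rw [Char.le_def] at h1 h2
    constructor
    · intro hc
      exfalso
      have h1' : 65 ≤ c.toNat := UInt32.le_iff_toNat_le.mp h1
      have h2' : c.toNat ≤ 90 := UInt32.le_iff_toNat_le.mp h2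
      set n := c.toNat with hn
      interval_cases n <;> revert hc <;> decide
    · intro hc
      subst hc
      exact absurd (UInt32.le_iff_toNat_le.mp h1) (by decide)
  · exact Iff.rfl

-- the scanner invariant: with a space-free (already lowered) running token, the scan of
-- the remaining characters plus the sentinel decides `any pvChk` of the full token split
theorem pv_scan_spec (cs : List Char) : ∀ (acc : List Char), ' ' ∉ acc →
    pvScan (cs ++ [' ']) acc
      = (List.splitOn ' ' (acc ++ cs.map PySem.Chars.lowerChar)).any pvChk := by
  induction cs with
  | nil =>
    intro acc hacc
    simp only [List.nil_append, List.map_nil, List.append_nil, pv_splitOn_spacefree acc hacc]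
    simp [pvScan, pvChk, pv_trim_eq_strip]
  | cons c rest ih =>
    intro acc hacc
    by_cases hc : c = ' '
    · subst hc
      have hsp : PySem.Chars.lowerChar ' ' = ' ' := by decide
      have hchk : pvTargets.contains (String.ofList (PySem.Chars.stripChars acc ".,!?".toList))
          = pvChk acc := by rw [pvChk]
      rw [List.cons_append, pvScan, if_pos rfl, List.map_cons, hsp,
        pv_splitOn_mid acc _ hacc, List.any_cons, pv_trim_eq_strip, ih [] (by simp),
        List.nil_append, hchk]
      cases ht : pvChk acc
      · rw [if_neg (fun hx => Bool.false_ne_true hx)]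
        simp
      · rw [if_pos rfl]
        simp
    · rw [List.cons_append, pvScan, if_neg hc]
      have hl : PySem.Chars.lowerChar c ≠ ' ' := fun h => hc ((pv_lowerChar_space c).mp h)
      have hacc' : ' ' ∉ acc ++ [PySem.Chars.lowerChar c] := by
        intro hm
        rcases List.mem_append.mp hm with hm | hm
        · exact hacc hm
        · exact hl ((List.mem_singleton.mp hm).symm)
      rw [ih (acc ++ [PySem.Chars.lowerChar c]) hacc']
      simp

-- A's two staged `any` scans over twelve targets collapse to one token pass with pvChk
theorem pv_A_eq_any (text : String) :
    has_gendered_substr text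
      = (List.splitOn ' ' (PySem.Chars.lower text.toList)).any pvChk := by
  unfold has_gendered_substr pvWords
  rw [PySem.Str.split?]
  have hsep : PySem.Chars.split? (PySem.Str.lower text).toList " ".toList
      = some (PySem.Chars.splitOn (PySem.Str.lower text).toList [' ']) := by
    rw [PySem.Chars.split?]; rfl
  rw [hsep]
  simp only [Option.map_some, Option.getD_some]
  rw [← List.any_append]
  have hswap : ∀ (ts ws : List String) (f : String → String),
      ts.any (fun s => ws.any (fun w => s == f w)) = ws.any (fun w => ts.contains (f w)) := by
    intro ts ws f
    rw [Bool.eq_iff_iff]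
    simp only [List.any_eq_true, List.contains_iff_mem, beq_iff_eq]
    constructor
    · rintro ⟨s, hs, w, hw, rfl⟩; exact ⟨w, hw, hs⟩
    · rintro ⟨w, hw, hf⟩; exact ⟨f w, hf, w, hw, rfl⟩
  rw [hswap]
  have hlow : (PySem.Str.lower text).toList = PySem.Chars.lower text.toList := by
    simp [PySem.Str.lower]
  rw [hlow, pv_splitOn_eq, List.any_map]
  congr 1
  funext tok
  simp [Function.comp, pvChk, pvTargets, PySem.Str.stripChars]

-- ===== VERDICT (by name: the statement is the Claim_ definition above) =====
theorem has_gendered_substr_spec : Claim_equal_has_gendered_substr := by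
  intro text _
  unfold Spec_has_gendered_substr has_gendered_substr_alt
  rw [pv_scan_spec text.toList [] (by simp), pv_A_eq_any]
  simp [PySem.Chars.lower]
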